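-- pv_equiv track=rewrite | github.com/sagemath/sage-archive-2023-02-01 | src/sage/modular/multiple_zeta_F_algebra.py | basis_f_odd_iterator
-- ===== SOURCE A (Python) =====
-- from typing import Iterator
--
-- def basis_f_odd_iterator(n) -> Iterator[tuple]:
--     """
--     Return an iterator over compositions of ``n`` with parts in ``(3,5,7,...)``
--
--     This is used to index a basis.
--
--     INPUT:
--
--     - ``n`` -- an integer
--
--     EXAMPLES::
--
--         sage: from sage.modular.multiple_zeta_F_algebra import basis_f_odd_iterator
--         sage: [list(basis_f_odd_iterator(i)) for i in range(2,9)]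
--         [[], [(3,)], [], [(5,)], [(3, 3)], [(7,)], [(5, 3), (3, 5)]]
--         sage: list(basis_f_odd_iterator(14))
--         [(11, 3),
--          (5, 3, 3, 3),
--          (3, 5, 3, 3),
--          (3, 3, 5, 3),
--          (9, 5),
--          (3, 3, 3, 5),
--          (7, 7),
--          (5, 9),
--          (3, 11)]
--     """
--     if n == 0:
--         yield tuple()
--         return
--     if n == 1:
--         return
--     if n % 2:
--         yield (n,)
--     for k in range(3, n, 2):
--         for start in basis_f_odd_iterator(n - k):
--             yield start + (k, )
-- ===== SOURCE B (Python) =====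
-- def basis_f_odd_iterator(n):
--     # Iterative depth-first enumeration with an explicit stack of frames
--     # (m, suffix, k): enumerate compositions of m, append `suffix` to each;
--     # k = None means the frame is fresh, otherwise resume its part-loop at k.
--     if n == 0:
--         yield tuple()
--         return
--     stack = [(n, (), None)]
--     while stack:
--         m, suffix, k = stack.pop()
--         if k is None:
--             if m == 1:
--                 continue
--             if m % 2:
--                 yield (m,) + suffix
--             k = 3
--         if k < m:
--             stack.append((m, suffix, k + 2))
--             stack.append((m - k, (k,) + suffix, None))
-- ===== Notes on version B (the rewrite author's own statement) =====
-- stated objective: alternative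
-- what changed: Replaces A's recursive generator (nested sub-generators, one per recursion level) by an iterative depth-first enumeration driven by an explicit stack of (value, suffix, resume-k) frames that builds each composition back-to-front, yielding every item from a single flat loop.
import Mathlib
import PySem

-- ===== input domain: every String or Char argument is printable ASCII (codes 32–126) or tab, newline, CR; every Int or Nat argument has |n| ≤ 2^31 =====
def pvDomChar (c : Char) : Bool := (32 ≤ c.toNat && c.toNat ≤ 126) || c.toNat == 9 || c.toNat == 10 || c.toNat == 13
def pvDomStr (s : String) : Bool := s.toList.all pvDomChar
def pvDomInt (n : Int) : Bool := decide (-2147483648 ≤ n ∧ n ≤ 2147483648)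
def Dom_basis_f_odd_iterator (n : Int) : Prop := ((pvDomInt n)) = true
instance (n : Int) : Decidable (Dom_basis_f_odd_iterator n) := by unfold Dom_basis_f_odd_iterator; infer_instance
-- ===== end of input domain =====

-- B replaces A's recursive generator by an iterative depth-first enumeration
-- driven by an explicit stack of frames (same values, same yield order).

-- ===== PORT A =====
-- Literal port of A's recursion; `.attach` only carries the membership proof
-- needed for termination, the computation is identical.
def basis_f_odd_iterator (n : Int) : List (List Int) :=
  if n = 0 then [[]]
  else if n = 1 then []
  else
    (if PySem.Int.mod n 2 ≠ 0 then [[n]] else []) ++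
    (PySem.List.pyRange 3 n 2).attach.flatMap
      (fun ⟨k, hk⟩ => (basis_f_odd_iterator (n - k)).map (fun s => s ++ [k]))
termination_by n.toNat
decreasing_by
  have h3 := (PySem.List.mem_pyRange_iff_of_pos (by norm_num : (0:Int) < 2) k).mp hk
  omega

-- ===== PORT B =====
-- termination measure of one stack frame (proof bookkeeping only)
def pvMeasure (f : Int × List Int × Option Int) : Nat :=
  match f with
  | (m, _, none) => 3 ^ m.toNat + 1
  | (m, _, some k) => 3 ^ (m - k + 3).toNat

-- B's while-loop: pop a frame (m, suffix, k); a fresh frame (k = none) may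
-- yield m :: suffix and starts its part-loop at k = 3; k < m pushes the
-- continuation frame and the sub-frame (Python pushes them in this order and
-- pops from the end, hence the two cons cells).
def pvLoop (stack : List (Int × List Int × Option Int)) (acc : List (List Int)) : List (List Int) :=
  match stack with
  | [] => acc
  | (m, suffix, none) :: rest =>
    if m = 1 then pvLoop rest acc
    else
      let acc' := if PySem.Int.mod m 2 ≠ 0 then acc ++ [m :: suffix] else acc
      if 3 < m then pvLoop ((m - 3, 3 :: suffix, none) :: (m, suffix, some 5) :: rest) acc'
      else pvLoop rest acc'
  | (m, suffix, some k) :: rest =>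
    if k < m then pvLoop ((m - k, k :: suffix, none) :: (m, suffix, some (k + 2)) :: rest) acc
    else pvLoop rest acc
termination_by (stack.map pvMeasure).sum
decreasing_by
  · simp only [List.map_cons, List.sum_cons, pvMeasure]
    have : (1:Nat) ≤ 3 ^ m.toNat := Nat.one_le_pow _ _ (by norm_num)
    omega
  · simp only [List.map_cons, List.sum_cons, pvMeasure]
    have hm : 4 ≤ m.toNat := by omega
    have e1 : m.toNat = (m - 3).toNat + 3 := by omega
    have e2 : (m - 5 + 3).toNat = (m - 3).toNat + 1 := by omega
    rw [e1, e2, pow_add, pow_add]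
    have : (1:Nat) ≤ 3 ^ (m - 3).toNat := Nat.one_le_pow _ _ (by norm_num)
    omega
  · simp only [List.map_cons, List.sum_cons, pvMeasure]
    have : (1:Nat) ≤ 3 ^ m.toNat := Nat.one_le_pow _ _ (by norm_num)
    omega
  · simp only [List.map_cons, List.sum_cons, pvMeasure]
    have e1 : (m - k + 3).toNat = (m - k).toNat + 3 := by omega
    have e2 : (m - (k + 2) + 3).toNat = (m - k).toNat + 1 := by omega
    rw [e1, e2, pow_add, pow_add]
    have : (1:Nat) ≤ 3 ^ (m - k).toNat := Nat.one_le_pow _ _ (by norm_num)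
    omega
  · simp only [List.map_cons, List.sum_cons, pvMeasure]
    have : (1:Nat) ≤ 3 ^ (m - k + 3).toNat := Nat.one_le_pow _ _ (by norm_num)
    omega

def basis_f_odd_iterator_alt (n : Int) : List (List Int) :=
  if n = 0 then [[]]
  else pvLoop [(n, [], none)] []

-- ===== PRECONDITION & SPEC =====
def Spec_basis_f_odd_iterator (n : Int) (out : List (List Int)) : Prop := out = basis_f_odd_iterator_alt n
instance (n : Int) (out : List (List Int)) : Decidable (Spec_basis_f_odd_iterator n out) := by unfold Spec_basis_f_odd_iterator; infer_instance

-- ===== CLAIM (what is proved, stated in full; the proofs are below) =====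
def Claim_equal_basis_f_odd_iterator : Prop := ∀ (n : Int), Dom_basis_f_odd_iterator n → Spec_basis_f_odd_iterator n (basis_f_odd_iterator n)

-- ===== LEMMAS AND PROOFS =====

theorem pvA_zero : basis_f_odd_iterator 0 = [[]] := by
  rw [basis_f_odd_iterator]; norm_num

theorem pvA_one : basis_f_odd_iterator 1 = [] := by
  rw [basis_f_odd_iterator]; norm_num

-- A's attached flatMap is a plain flatMap (the lambda ignores the proof).
theorem pvA_unfold (n : Int) (h0 : n ≠ 0) (h1 : n ≠ 1) :
    basis_f_odd_iterator n =
      (if PySem.Int.mod n 2 ≠ 0 then [[n]] else []) ++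
      (PySem.List.pyRange 3 n 2).flatMap
        (fun k => (basis_f_odd_iterator (n - k)).map (fun s => s ++ [k])) := by
  rw [basis_f_odd_iterator]
  simp [h0, h1]

-- a step-2 range with something in it starts at its left end
theorem pvRange_two_cons (a b : Int) (h : a < b) :
    PySem.List.pyRange a b 2 = a :: PySem.List.pyRange (a + 2) b 2 := by
  rw [PySem.List.pyRange_of_pos _ _ (by norm_num : (0:Int) < 2),
      PySem.List.pyRange_of_pos _ _ (by norm_num : (0:Int) < 2)]
  by_cases h2 : a + 2 < b
  · have hC : ((b - a + 2 - 1) / 2).toNat = ((b - (a + 2) + 2 - 1) / 2).toNat + 1 := by omega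
    rw [if_pos h, if_pos h2, hC, List.range_succ_eq_map]
    simp only [List.map_cons, List.map_map, Nat.cast_zero, mul_zero, add_zero]
    congr 1
    apply List.map_congr_left
    intro x _
    simp only [Function.comp_apply, Nat.succ_eq_add_one]
    push_cast
    ring
  · have hC : ((b - a + 2 - 1) / 2).toNat = 1 := by omega
    rw [if_pos h, if_neg h2, hC]
    simp

-- the output of one stack frame, as a recursive function (proof device)
def pvOut (f : Int × List Int × Option Int) : List (List Int) :=
  match f with
  | (m, suffix, none) =>
    if m = 1 then []
    else (if PySem.Int.mod m 2 ≠ 0 then [m :: suffix] else []) ++ pvOut (m, suffix, some 3)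
  | (m, suffix, some k) =>
    if k < m then pvOut (m - k, k :: suffix, none) ++ pvOut (m, suffix, some (k + 2)) else []
termination_by pvMeasure f
decreasing_by
  · simp only [pvMeasure]
    have e : m - 3 + 3 = m := by ring
    rw [e]; omega
  · simp only [pvMeasure]
    have e1 : (m - k + 3).toNat = (m - k).toNat + 3 := by omega
    rw [e1, pow_add]
    have : (1:Nat) ≤ 3 ^ (m - k).toNat := Nat.one_le_pow _ _ (by norm_num)
    omega
  · simp only [pvMeasure]
    exact Nat.pow_lt_pow_right (by norm_num) (by omega)

theorem pvOut_one (suffix : List Int) : pvOut (1, suffix, none) = [] := by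
  rw [pvOut.eq_def]
  simp

theorem pvOut_none (m : Int) (suffix : List Int) (h : m ≠ 1) :
    pvOut (m, suffix, none) =
      (if PySem.Int.mod m 2 ≠ 0 then [m :: suffix] else []) ++ pvOut (m, suffix, some 3) := by
  rw [pvOut.eq_def]
  simp [h]

theorem pvOut_some (m : Int) (suffix : List Int) (k : Int) :
    pvOut (m, suffix, some k) =
      if k < m then pvOut (m - k, k :: suffix, none) ++ pvOut (m, suffix, some (k + 2))
      else [] := by
  rw [pvOut.eq_def]

-- the declarative meaning of one stack frame
def pvGoal : (Int × List Int × Option Int) → Prop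
  | (m, suffix, none) =>
      m ≠ 0 → pvOut (m, suffix, none) = (basis_f_odd_iterator m).map (· ++ suffix)
  | (m, suffix, some k) =>
      pvOut (m, suffix, some k) =
        (PySem.List.pyRange k m 2).flatMap
          (fun j => (basis_f_odd_iterator (m - j)).map (fun t => t ++ j :: suffix))

theorem pvOut_goal (f : Int × List Int × Option Int) : pvGoal f := by
  induction f using pvOut.induct with
  | case1 suffix =>
    simp only [pvGoal]
    intro _
    rw [pvOut_one, pvA_one]
    simp
  | case2 m suffix hm1 ih =>
    simp only [pvGoal] at ih ⊢
    intro hm0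
    rw [pvOut_none m suffix hm1, pvA_unfold m hm0 hm1, ih]
    simp only [List.map_append, List.map_flatMap, List.map_map]
    congr 1
    · split_ifs <;> simp
    · apply List.flatMap_congr
      intro j _
      apply List.map_congr_left
      intro t _
      simp
  | case3 m suffix k hk ihn ihs =>
    simp only [pvGoal] at ihn ihs ⊢
    rw [pvOut_some, if_pos hk, ihn (by omega), ihs, pvRange_two_cons k m hk,
        List.flatMap_cons]
  | case4 m suffix k hk =>
    simp only [pvGoal]
    rw [pvOut_some, if_neg hk]
    have he : PySem.List.pyRange k m 2 = [] := by
      rw [PySem.List.pyRange_of_pos _ _ (by norm_num : (0:Int) < 2)]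
      simp [hk]
    rw [he, List.flatMap_nil]

-- the loop emits, after acc, exactly the concatenated outputs of its stack
theorem pvLoop_eq (stack : List (Int × List Int × Option Int)) (acc : List (List Int)) :
    pvLoop stack acc = acc ++ (stack.map pvOut).flatten := by
  induction stack, acc using pvLoop.induct with
  | case1 acc =>
    rw [pvLoop.eq_def]
    simp
  | case2 acc suffix rest ih =>
    rw [pvLoop.eq_def]
    simp [ih, pvOut_one]
  | case3 acc m suffix rest hm1 acc' h3 ih =>
    rw [pvLoop.eq_def]
    dsimp only
    simp only [if_neg hm1, if_pos h3]
    rw [show (if PySem.Int.mod m 2 ≠ 0 then acc ++ [m :: suffix] else acc) = acc' from rfl, ih]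
    simp only [List.map_cons, List.flatten_cons, pvOut_none m suffix hm1, pvOut_some m suffix 3, if_pos h3]
    dsimp only [acc']
    split_ifs <;> simp
  | case4 acc m suffix rest hm1 acc' h3 ih =>
    rw [pvLoop.eq_def]
    dsimp only
    simp only [if_neg hm1, if_neg h3]
    rw [show (if PySem.Int.mod m 2 ≠ 0 then acc ++ [m :: suffix] else acc) = acc' from rfl, ih]
    simp only [List.map_cons, List.flatten_cons, pvOut_none m suffix hm1, pvOut_some m suffix 3, if_neg h3]
    dsimp only [acc']
    split_ifs <;> simp
  | case5 acc m suffix k rest hk ih =>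
    rw [pvLoop.eq_def]
    dsimp only
    simp only [if_pos hk]
    rw [ih]
    simp only [List.map_cons, List.flatten_cons, pvOut_some m suffix k, if_pos hk]
    simp
  | case6 acc m suffix k rest hk ih =>
    rw [pvLoop.eq_def]
    dsimp only
    simp only [if_neg hk]
    rw [ih]
    simp only [List.map_cons, List.flatten_cons, pvOut_some m suffix k, if_neg hk]
    simp

-- ===== VERDICT (by name: the statement is the Claim_ definition above) =====
theorem basis_f_odd_iterator_spec : Claim_equal_basis_f_odd_iterator := by
  intro n _
  unfold Spec_basis_f_odd_iterator
  by_cases h0 : n = 0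
  · subst h0
    rw [pvA_zero, basis_f_odd_iterator_alt]
    norm_num
  · have hg := pvOut_goal (n, [], none)
    simp only [pvGoal] at hg
    rw [basis_f_odd_iterator_alt, if_neg h0, pvLoop_eq]
    simp only [List.map_cons, List.map_nil, List.flatten_cons, List.flatten_nil,
               List.nil_append, List.append_nil]
    rw [hg h0]
    simp
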